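-- pv_equiv track=rewrite | github.com/headsvk/10x-factorio-engineer | dev/quality_planner.py | _tech_locked_machines
-- ===== SOURCE A (Python) =====
-- TECH_GATES: dict[str, dict] = {
--     "recycling":              {"machines": ["recycler"]},
--     "tungsten-carbide":       {"machines": ["foundry"]},
--     "electromagnetic-plant":  {"machines": ["electromagnetic-plant"]},
--     "cryogenic-plant":        {"machines": ["cryogenic-plant"]},
--     "biochamber":             {"machines": ["biochamber"]},
--     "quality-module":         {"quality_tier": 1},
--     "quality-module-2":       {"quality_tier": 2},
--     "quality-module-3":       {"quality_tier": 3},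
-- }
--
-- def _tech_locked_machines(tech_state: dict[str, int]) -> frozenset[str]:
--     """Return machine keys that are LOCKED by the given tech_state.
--     A tech absent from the dict is treated as locked (LEVEL=0)."""
--     locked: set[str] = set()
--     for tech, info in TECH_GATES.items():
--         if tech_state.get(tech, 0) >= 1:
--             continue
--         for m in info.get("machines", []):
--             locked.add(m)
--     return frozenset(locked)
-- ===== SOURCE B (Python) =====
-- TECH_GATES: dict[str, dict] = {
--     "recycling":              {"machines": ["recycler"]},
--     "tungsten-carbide":       {"machines": ["foundry"]},
--     "electromagnetic-plant":  {"machines": ["electromagnetic-plant"]},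
--     "cryogenic-plant":        {"machines": ["cryogenic-plant"]},
--     "biochamber":             {"machines": ["biochamber"]},
--     "quality-module":         {"quality_tier": 1},
--     "quality-module-2":       {"quality_tier": 2},
--     "quality-module-3":       {"quality_tier": 3},
-- }
--
--
-- def _tech_locked_machines(tech_state: dict[str, int]) -> frozenset[str]:
--     """Set difference: all gated machines minus those whose tech is researched."""
--     all_machines = {m for info in TECH_GATES.values()
--                     for m in info.get("machines", [])}
--     unlocked = {m for tech, info in TECH_GATES.items()
--                 if tech_state.get(tech, 0) >= 1
--                 for m in info.get("machines", [])}
--     return frozenset(all_machines - unlocked)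
-- ===== Notes on version B (the rewrite author's own statement) =====
-- stated objective: alternative
-- what changed: Replaces A's per-gate guard-and-add accumulation of locked machines with two independently built sets (all gated machines, and machines of researched techs) combined by a single set difference.
import Mathlib
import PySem

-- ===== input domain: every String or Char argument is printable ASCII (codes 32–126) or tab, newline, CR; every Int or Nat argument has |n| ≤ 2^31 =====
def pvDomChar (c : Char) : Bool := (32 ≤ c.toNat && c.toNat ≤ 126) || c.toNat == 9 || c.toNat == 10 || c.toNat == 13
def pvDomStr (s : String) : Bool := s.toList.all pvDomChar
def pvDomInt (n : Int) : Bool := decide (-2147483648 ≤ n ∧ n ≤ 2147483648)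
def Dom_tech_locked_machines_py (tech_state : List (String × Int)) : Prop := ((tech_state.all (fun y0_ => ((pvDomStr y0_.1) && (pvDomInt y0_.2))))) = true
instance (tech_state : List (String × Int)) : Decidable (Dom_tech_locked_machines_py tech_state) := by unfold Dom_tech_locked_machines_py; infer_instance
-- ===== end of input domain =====

-- B builds the set of all gated machines and the set of unlocked machines separately and
-- returns their set difference, instead of A's single guard-and-add loop (objective: alternative).

-- ===== PORT A =====
-- TECH_GATES with only the field A reads: info.get("machines", []) (quality-module gates have none).
def pvGates : List (String × List String) :=
  [("recycling", ["recycler"]),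
   ("tungsten-carbide", ["foundry"]),
   ("electromagnetic-plant", ["electromagnetic-plant"]),
   ("cryogenic-plant", ["cryogenic-plant"]),
   ("biochamber", ["biochamber"]),
   ("quality-module", []),
   ("quality-module-2", []),
   ("quality-module-3", [])]

def tech_locked_machines_py (tech_state : List (String × Int)) : List String :=
  pvGates.foldl
    (fun locked p =>
      if PySem.Dict.getD (PySem.Dict.mk tech_state) p.1 (0 : Int) ≥ 1 then locked
      else p.2.foldl (fun s m => PySem.Set.add s m) locked)
    PySem.Set.empty

-- ===== PORT B =====
def tech_locked_machines_py_alt (tech_state : List (String × Int)) : List String :=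
  let all_machines : PySem.Set String :=
    pvGates.foldl (fun s p => p.2.foldl (fun s m => PySem.Set.add s m) s) PySem.Set.empty
  let unlocked : PySem.Set String :=
    pvGates.foldl
      (fun s p =>
        if PySem.Dict.getD (PySem.Dict.mk tech_state) p.1 (0 : Int) ≥ 1 then
          p.2.foldl (fun s m => PySem.Set.add s m) s
        else s)
      PySem.Set.empty
  PySem.Set.diff all_machines unlocked

-- ===== PRECONDITION & SPEC =====
def Spec_tech_locked_machines_py (tech_state : List (String × Int)) (out : List String) : Prop := out = tech_locked_machines_py_alt tech_state
instance (tech_state : List (String × Int)) (out : List String) : Decidable (Spec_tech_locked_machines_py tech_state out) := by unfold Spec_tech_locked_machines_py; infer_instance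

-- ===== CLAIM (what is proved, stated in full; the proofs are below) =====
def Claim_equal_tech_locked_machines_py : Prop := ∀ (tech_state : List (String × Int)), Dom_tech_locked_machines_py tech_state → Spec_tech_locked_machines_py tech_state (tech_locked_machines_py tech_state)

-- ===== LEMMAS AND PROOFS =====

-- ===== VERDICT (by name: the statement is the Claim_ definition above) =====
theorem tech_locked_machines_py_spec : Claim_equal_tech_locked_machines_py := by
  intro ts _
  unfold Spec_tech_locked_machines_py tech_locked_machines_py tech_locked_machines_py_alt pvGates
  by_cases h1 : PySem.Dict.getD (PySem.Dict.mk ts) "recycling" (0 : Int) ≥ 1 <;>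
  by_cases h2 : PySem.Dict.getD (PySem.Dict.mk ts) "tungsten-carbide" (0 : Int) ≥ 1 <;>
  by_cases h3 : PySem.Dict.getD (PySem.Dict.mk ts) "electromagnetic-plant" (0 : Int) ≥ 1 <;>
  by_cases h4 : PySem.Dict.getD (PySem.Dict.mk ts) "cryogenic-plant" (0 : Int) ≥ 1 <;>
  by_cases h5 : PySem.Dict.getD (PySem.Dict.mk ts) "biochamber" (0 : Int) ≥ 1 <;>
  simp [h1, h2, h3, h4, h5, PySem.Set.add, PySem.Set.diff, PySem.Set.empty,
        PySem.Set.contains, List.foldl]
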